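-- pv_equiv track=rewrite | github.com/thoratomkar/Coding-Porfolio | Leetcode Solutions/possible number of tiles.py | numTilePossibilities
-- ===== SOURCE A (Python) =====
-- from itertools import combinations
--
-- def numTilePossibilities(tiles: str) -> int:
--     l = []
--     res = []
--     for i in tiles:
--         l.append(i)
--     for i in range(len(l)+1):
--         for subset in combinations(l, i):
--             res.append(subset)
--     return len(list(res))
-- ===== SOURCE B (Python) =====
-- def numTilePossibilities(tiles: str) -> int:
--     # Total number of i-combinations over all i of an n-element multiset of
--     # positions is sum_i C(n,i) = 2**n; closed form, no enumeration.
--     return 2 ** len(tiles)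
-- ===== Notes on version B (the rewrite author's own statement) =====
-- stated objective: faster
-- what changed: Replaces the explicit enumeration of all combinations of every length with the closed form 2**len(tiles), since sum over i of C(n,i) = 2^n.
import Mathlib
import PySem

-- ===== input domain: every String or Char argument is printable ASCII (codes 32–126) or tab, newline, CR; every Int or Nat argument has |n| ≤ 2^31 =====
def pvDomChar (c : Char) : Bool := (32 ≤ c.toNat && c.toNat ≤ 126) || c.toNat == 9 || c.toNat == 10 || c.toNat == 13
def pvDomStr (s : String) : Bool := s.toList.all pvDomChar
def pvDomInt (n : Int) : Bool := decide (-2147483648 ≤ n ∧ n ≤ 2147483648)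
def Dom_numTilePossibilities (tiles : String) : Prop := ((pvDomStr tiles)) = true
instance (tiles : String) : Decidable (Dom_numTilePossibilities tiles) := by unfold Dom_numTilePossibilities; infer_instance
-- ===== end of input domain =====

-- B replaces A's enumeration of all combinations of every length by the closed form 2^len(tiles) (faster).


-- ===== PORT A =====
-- itertools.combinations(l, i) is ported as List.sublistsLen i l (same tuples, one per position-subset).
def numTilePossibilities (tiles : String) : Int :=
  let l : List Char := tiles.toList.foldl (fun acc c => acc ++ [c]) []
  let res : List (List Char) :=
    (List.range (l.length + 1)).foldl
      (fun acc i => (List.sublistsLen i l).foldl (fun a s => a ++ [s]) acc) []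
  (res.length : Int)

-- ===== PORT B =====
def numTilePossibilities_alt (tiles : String) : Int :=
  (2 : Int) ^ tiles.toList.length

-- ===== PRECONDITION & SPEC =====
def Spec_numTilePossibilities (tiles : String) (out : Int) : Prop := out = numTilePossibilities_alt tiles
instance (tiles : String) (out : Int) : Decidable (Spec_numTilePossibilities tiles out) := by unfold Spec_numTilePossibilities; infer_instance

-- ===== CLAIM (what is proved, stated in full; the proofs are below) =====
def Claim_equal_numTilePossibilities : Prop := ∀ (tiles : String), Dom_numTilePossibilities tiles → Spec_numTilePossibilities tiles (numTilePossibilities tiles)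

-- ===== LEMMAS AND PROOFS =====

theorem pv_foldl_snoc {α : Type} (xs : List α) (a : List α) :
    xs.foldl (fun acc c => acc ++ [c]) a = a ++ xs := by
  induction xs generalizing a with
  | nil => simp
  | cons x xs ih => simp [List.foldl, ih]

theorem pv_outer_len (l : List Char) (ns : List ℕ) (a : List (List Char)) :
    (ns.foldl (fun acc i => acc ++ List.sublistsLen i l) a).length
      = a.length + (ns.map (fun i => Nat.choose l.length i)).sum := by
  induction ns generalizing a with
  | nil => simp
  | cons n ns ih =>
    rw [List.foldl_cons, ih]
    simp [List.length_sublistsLen]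
    omega

theorem pv_sum_choose (n : ℕ) :
    ((List.range (n + 1)).map (fun i => Nat.choose n i)).sum = 2 ^ n := by
  have h := Nat.sum_range_choose n
  simpa [Finset.sum_range, Finset.range, Multiset.range, Finset.sum] using h

-- ===== VERDICT (by name: the statement is the Claim_ definition above) =====
theorem numTilePossibilities_spec : Claim_equal_numTilePossibilities := by
  intro tiles _
  unfold Spec_numTilePossibilities numTilePossibilities numTilePossibilities_alt
  simp only [pv_foldl_snoc, List.nil_append, pv_outer_len, List.length_nil, Nat.zero_add,
    pv_sum_choose]
  push_cast
  ring
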